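-- pv_equiv track=rewrite | github.com/abc1199281/repo-lantern | src/lantern_cli/core/planning_tools.py | prepare_file_tree
-- ===== SOURCE A (Python) =====
-- from typing import Any
--
-- def prepare_file_tree(file_list: list[str], max_chars: int = 4000) -> str:
--     """Format a file list as an indented directory tree.
--
--     Args:
--         file_list: List of relative file paths.
--         max_chars: Maximum output length in characters.
--
--     Returns:
--         Indented tree representation of the file structure.
--     """
--     if not file_list:
--         return "No files found."
--
--     # Build a tree structure from paths
--     tree: dict[str, Any] = {}
--     for file_path in sorted(file_list):
--         parts = file_path.split("/")
--         node = tree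
--         for part in parts:
--             if part not in node:
--                 node[part] = {}
--             node = node[part]
--
--     # Render the tree
--     lines: list[str] = []
--
--     def _render(node: dict[str, Any], prefix: str = "", is_last: bool = True) -> None:
--         items = sorted(node.keys())
--         for i, name in enumerate(items):
--             last = i == len(items) - 1
--             connector = "`-- " if last else "|-- "
--             lines.append(f"{prefix}{connector}{name}")
--             if node[name]:  # has children
--                 extension = "    " if last else "|   "
--                 _render(node[name], prefix + extension, last)
--
--     _render(tree)
--     result = "\n".join(lines)
--     if len(result) > max_chars:
--         result = result[:max_chars] + "\n\n...(truncated)"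
--     return result
-- ===== SOURCE B (Python) =====
-- def prepare_file_tree(file_list: list[str], max_chars: int = 4000) -> str:
--     """Format a file list as an indented directory tree.
--
--     Flat algorithm: collect every path prefix, sort them lexicographically
--     (that order IS the tree's pre-order), and compute each line's indentation
--     directly from "is this prefix the last among its siblings" tests.
--     """
--     if not file_list:
--         return "No files found."
--
--     # Every non-empty prefix of every path, as a tuple of parts.
--     prefixes = set()
--     for path in file_list:
--         parts = path.split("/")
--         for i in range(1, len(parts) + 1):
--             prefixes.add(tuple(parts[:i]))
--
--     # Greatest child name under each parent prefix.
--     maxchild = {}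
--     for r in prefixes:
--         parent = r[:-1]
--         if parent not in maxchild or maxchild[parent] < r[-1]:
--             maxchild[parent] = r[-1]
--
--     def is_last(q):
--         # q is alphabetically greatest among its siblings
--         return q[-1] == maxchild[q[:-1]]
--
--     lines = []
--     for p in sorted(prefixes):
--         pre = "".join("    " if is_last(p[:j]) else "|   "
--                       for j in range(1, len(p)))
--         connector = "`-- " if is_last(p) else "|-- "
--         lines.append(pre + connector + p[-1])
--
--     result = "\n".join(lines)
--     if len(result) > max_chars:
--         result = result[:max_chars] + "\n\n...(truncated)"
--     return result
-- ===== Notes on version B (the rewrite author's own statement) =====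
-- stated objective: alternative
-- what changed: Replaces the nested-dict tree build plus recursive pre-order rendering with a flat computation: collect all path prefixes into one set, precompute the greatest child name per parent, sort the prefixes lexicographically (which equals the tree's pre-order), and derive each line's connector and indentation directly from is-last-among-siblings tests.
import Mathlib
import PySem

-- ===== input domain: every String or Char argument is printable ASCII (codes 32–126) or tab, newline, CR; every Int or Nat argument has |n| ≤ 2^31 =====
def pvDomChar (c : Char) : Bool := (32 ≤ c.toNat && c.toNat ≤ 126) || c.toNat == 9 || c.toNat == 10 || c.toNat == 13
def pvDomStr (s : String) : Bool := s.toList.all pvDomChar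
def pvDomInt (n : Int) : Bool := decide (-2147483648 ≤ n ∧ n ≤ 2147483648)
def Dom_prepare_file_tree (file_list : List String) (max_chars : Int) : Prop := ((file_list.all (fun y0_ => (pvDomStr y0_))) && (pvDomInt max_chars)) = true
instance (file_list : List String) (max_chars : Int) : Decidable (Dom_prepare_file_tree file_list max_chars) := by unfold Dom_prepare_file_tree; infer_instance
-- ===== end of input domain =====

-- B is an alternative algorithm: instead of building a nested tree and rendering it
-- recursively, it collects all path prefixes, sorts them lexicographically (= the
-- tree's pre-order) and computes every line's indentation directly.

-- ===== PORT A =====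
-- file_path.split("/")
def pftParts (s : String) : List String := (PySem.Str.split? s "/").getD []

-- A's nested dict of dicts is represented by the list of its key paths, in global
-- insertion order (per-node key order = first-appearance order, as in the nested dict);
-- the walk 'if part not in node: node[part] = {}; node = node[part]' becomes:
def pftAdd (S : List (List String)) (parts : List String) : List (List String) :=
  (parts.foldl (fun st part =>
      let cur := st.2 ++ [part]
      ((if cur ∈ st.1 then st.1 else st.1 ++ [cur]), cur)) (S, ([] : List String))).1

def pftBuild (file_list : List String) : List (List String) :=
  (PySem.List.sorted file_list (fun x => x) false).foldl (fun S path => pftAdd S (pftParts path)) []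

-- node.keys() for the node at key path p (insertion order)
def pftChildren (S : List (List String)) (p : List String) : List String :=
  (S.filter (fun q => q.dropLast == p)).map (fun q => q.getLastD "")

def pftMaxLen (S : List (List String)) : Nat := S.foldl (fun acc q => max acc q.length) 0

-- termination bound for the recursive render (cited by decreasing_by)
lemma pftChildren_ne_nil_bound {S : List (List String)} {x : List String}
    (h : pftChildren S x ≠ []) : x.length ≤ pftMaxLen S := by
  unfold pftChildren at h
  rcases List.exists_mem_of_ne_nil _ h with ⟨n, hn⟩
  rcases List.mem_map.1 hn with ⟨q, hq, rfl⟩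
  rcases List.mem_filter.1 hq with ⟨hqS, hdrop⟩
  have hd : q.dropLast = x := by simpa using hdrop
  have hqM : q.length ≤ pftMaxLen S := (PySem.List.le_foldl_max_nat S List.length 0).2 q hqS
  subst hd
  simp only [List.length_dropLast]
  omega

-- the recursive _render (lines are returned instead of appended to a shared list)
mutual
def pftRenderA (S : List (List String)) (p : List String) (pre : String) : List String :=
  pftRenderItems S p pre (PySem.List.sorted (pftChildren S p) (fun x => x) false)
    (PySem.List.sorted (pftChildren S p) (fun x => x) false).length 0
  termination_by (pftMaxLen S + 1 - p.length, 1, 0)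
  decreasing_by simp [Prod.lex_iff]
def pftRenderItems (S : List (List String)) (p : List String) (pre : String)
    (items : List String) (n : Nat) (i : Nat) : List String :=
  match items with
  | [] => []
  | name :: rest =>
    let last := i == n - 1
    let connector := if last then "`-- " else "|-- "
    let sub := if h : pftChildren S (p ++ [name]) ≠ [] then
                 pftRenderA S (p ++ [name]) (pre ++ (if last then "    " else "|   "))
               else []
    (pre ++ connector ++ name) :: (sub ++ pftRenderItems S p pre rest n (i + 1))
  termination_by (pftMaxLen S + 1 - p.length, 0, items.length)
  decreasing_by
  · have hb := pftChildren_ne_nil_bound h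
    simp only [List.length_append, List.length_cons, List.length_nil] at hb
    simp only [Prod.lex_iff]
    left
    simp only [List.length_append, List.length_cons, List.length_nil]
    omega
  · simp [Prod.lex_iff]
end

def prepare_file_tree (file_list : List String) (max_chars : Int) : String :=
  if file_list = [] then "No files found."
  else
    let S := pftBuild file_list
    let lines := pftRenderA S [] ""
    let result := PySem.Str.join "\n" lines
    if PySem.Str.len result > max_chars then
      PySem.Str.slice result none (some max_chars) ++ "\n\n...(truncated)"
    else result

-- ===== PORT B =====
-- all non-empty prefixes of all paths, one flat set
def pftPrefixes (file_list : List String) : PySem.Set (List String) :=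
  file_list.foldl (fun pr path =>
    let parts := pftParts path
    (PySem.List.pyRange 1 ((parts.length : Int) + 1) 1).foldl
      (fun pr2 i => PySem.Set.add pr2 (PySem.List.slice parts none (some i))) pr)
    PySem.Set.empty

-- maxchild: greatest child name under each parent prefix
def pftMaxChild (prefixes : List (List String)) : PySem.Dict (List String) String :=
  prefixes.foldl (fun d r =>
    if !(d.contains r.dropLast) || (d.getD r.dropLast "" < r.getLastD "") then
      d.insert r.dropLast (r.getLastD "")
    else d) PySem.Dict.empty

-- q[-1] == maxchild[q[:-1]]  (the key is always present at B's call sites, so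
-- Python's '[]' lookup never raises; getD's default is unreachable there)
def pftIsLast (prefixes : List (List String)) (q : List String) : Bool :=
  (q.getLastD "") == (pftMaxChild prefixes).getD q.dropLast ""

def prepare_file_tree_alt (file_list : List String) (max_chars : Int) : String :=
  if file_list = [] then "No files found."
  else
    let prefixes := pftPrefixes file_list
    let lines := (PySem.List.sorted prefixes (fun x => x) false).foldl (fun acc p =>
      let pre := PySem.Str.join ""
        ((PySem.List.pyRange 1 ((p.length : Int)) 1).map (fun j =>
          if pftIsLast prefixes (PySem.List.slice p none (some j)) then "    " else "|   "))
      let connector := if pftIsLast prefixes p then "`-- " else "|-- "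
      acc ++ [pre ++ connector ++ p.getLastD ""]) []
    let result := PySem.Str.join "\n" lines
    if PySem.Str.len result > max_chars then
      PySem.Str.slice result none (some max_chars) ++ "\n\n...(truncated)"
    else result

-- ===== PRECONDITION & SPEC =====
def Spec_prepare_file_tree (file_list : List String) (max_chars : Int) (out : String) : Prop := out = prepare_file_tree_alt file_list max_chars
instance (file_list : List String) (max_chars : Int) (out : String) : Decidable (Spec_prepare_file_tree file_list max_chars out) := by unfold Spec_prepare_file_tree; infer_instance

-- ===== CLAIM (what is proved, stated in full; the proofs are below) =====
def Claim_equal_prepare_file_tree : Prop := ∀ (file_list : List String) (max_chars : Int), Dom_prepare_file_tree file_list max_chars → Spec_prepare_file_tree file_list max_chars (prepare_file_tree file_list max_chars)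

-- ===== LEMMAS AND PROOFS =====

-- proof-side notions ---------------------------------------------------------

-- the descendants of key path p present in S
def pvDesc (L : List (List String)) (p : List String) : List (List String) :=
  L.filter (fun q => decide (p <+: q ∧ q ≠ p))

def pvMarker (L : List (List String)) (x : List String) : String :=
  if pftIsLast L x then "    " else "|   "

-- the line B produces for q, relative to a rendering that starts at depth plen
-- with accumulated indentation pre
def pvLineRel (L : List (List String)) (plen : Nat) (pre : String) (q : List String) : String :=
  (pre ++ PySem.Str.join ""
      ((PySem.List.pyRange ((plen : Int) + 1) ((q.length : Int)) 1).map (fun j =>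
        pvMarker L (PySem.List.slice q none (some j))))) ++
  ((if pftIsLast L q then "`-- " else "|-- ") ++ q.getLastD "")

-- a well-formed prefix set
def pvGood (L : List (List String)) : Prop :=
  L.Nodup ∧ (∀ q ∈ L, q ≠ []) ∧
  (∀ q ∈ L, ∀ k : Nat, 1 ≤ k → k ≤ q.length → q.take k ∈ L)

-- which paths belong to the prefix set of fl
def pvMem (fl : List String) (q : List String) : Prop :=
  ∃ s ∈ fl, ∃ k : Nat, 1 ≤ k ∧ k ≤ (pftParts s).length ∧ q = (pftParts s).take k

-- basic facts ---------------------------------------------------------------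

lemma pv_mem_desc (L : List (List String)) (p q : List String) :
    q ∈ pvDesc L p ↔ q ∈ L ∧ p <+: q ∧ q ≠ p := by
  simp [pvDesc, List.mem_filter]

lemma pv_splitgo_ne_nil (sep : List Char) : ∀ (fuel : Nat) (l cur : List Char) (acc : List (List Char)),
    PySem.Chars.splitOn.go sep fuel l cur acc ≠ [] := by
  intro fuel
  induction fuel with
  | zero => intro l cur acc; simp [PySem.Chars.splitOn.go]
  | succ n ih =>
    intro l cur acc
    match l with
    | [] => simp [PySem.Chars.splitOn.go]
    | c :: rest =>
      rw [PySem.Chars.splitOn.go]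
      split
      · exact ih _ _ _
      · exact ih _ _ _

lemma pv_parts_ne_nil (s : String) : pftParts s ≠ [] := by
  unfold pftParts
  simp [PySem.Str.split?, PySem.Chars.split?, PySem.Chars.splitOn]
  exact pv_splitgo_ne_nil _ _ _ _ _

lemma pv_inner_mem (parts : List String) (pr : PySem.Set (List String)) (q : List String) :
    q ∈ (PySem.List.pyRange 1 ((parts.length : Int) + 1) 1).foldl
        (fun pr2 i => PySem.Set.add pr2 (PySem.List.slice parts none (some i))) pr
      ↔ q ∈ pr ∨ ∃ k : Nat, 1 ≤ k ∧ k ≤ parts.length ∧ q = parts.take k := by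
  rw [PySem.Set.mem_foldl_add]
  constructor
  · rintro (h | ⟨i, hi, rfl⟩)
    · exact Or.inl h
    · right
      rw [PySem.List.mem_pyRange_one] at hi
      refine ⟨i.toNat, by omega, by omega, ?_⟩
      rw [PySem.List.slice_to parts (by omega)]
  · rintro (h | ⟨k, hk1, hk2, rfl⟩)
    · exact Or.inl h
    · right
      refine ⟨(k : Int), ?_, ?_⟩
      · rw [PySem.List.mem_pyRange_one]; omega
      · rw [PySem.List.slice_to parts (by omega)]
        simp

lemma pv_prefixes_mem_aux (fl : List String) :
    ∀ (pr : PySem.Set (List String)) (q : List String),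
      q ∈ fl.foldl (fun pr path =>
          (PySem.List.pyRange 1 (((pftParts path).length : Int) + 1) 1).foldl
            (fun pr2 i => PySem.Set.add pr2 (PySem.List.slice (pftParts path) none (some i))) pr) pr
        ↔ q ∈ pr ∨ pvMem fl q := by
  induction fl with
  | nil => simp [pvMem]
  | cons s t ih =>
    intro pr q
    rw [List.foldl_cons, ih, pv_inner_mem]
    unfold pvMem
    simp only [List.mem_cons]
    constructor
    · rintro ((h | ⟨k, h1, h2, h3⟩) | ⟨s', hs', h⟩)
      · exact Or.inl h
      · exact Or.inr ⟨s, Or.inl rfl, k, h1, h2, h3⟩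
      · exact Or.inr ⟨s', Or.inr hs', h⟩
    · rintro (h | ⟨s', (rfl | hs'), h⟩)
      · exact Or.inl (Or.inl h)
      · exact Or.inl (Or.inr h)
      · exact Or.inr ⟨s', hs', h⟩

lemma pv_mem_prefixes (fl : List String) (q : List String) :
    q ∈ pftPrefixes fl ↔ pvMem fl q := by
  have := pv_prefixes_mem_aux fl PySem.Set.empty q
  unfold pftPrefixes
  simpa [PySem.Set.empty] using this

lemma pv_nodup_foldl_add {β : Type} (l : List β) (f : β → List String) :
    ∀ (s : PySem.Set (List String)), s.Nodup →
      (l.foldl (fun s b => PySem.Set.add s (f b)) s).Nodup := by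
  induction l with
  | nil => intro s hs; simpa
  | cons b t ih => intro s hs; exact ih _ (PySem.Set.nodup_add _ _ hs)

lemma pv_nodup_prefixes_aux (fl : List String) :
    ∀ (pr : PySem.Set (List String)), pr.Nodup →
      (fl.foldl (fun pr path =>
          (PySem.List.pyRange 1 (((pftParts path).length : Int) + 1) 1).foldl
            (fun pr2 i => PySem.Set.add pr2 (PySem.List.slice (pftParts path) none (some i))) pr) pr).Nodup := by
  induction fl with
  | nil => intro pr h; simpa
  | cons s t ih => intro pr h; exact ih _ (pv_nodup_foldl_add _ _ _ h)

lemma pv_nodup_prefixes (fl : List String) : (pftPrefixes fl).Nodup := by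
  unfold pftPrefixes
  exact pv_nodup_prefixes_aux fl PySem.Set.empty (by simp [PySem.Set.empty])

lemma pv_add_aux (parts : List String) : ∀ (S : List (List String)) (node : List String),
    (parts.foldl (fun st part =>
        let cur := st.2 ++ [part]
        ((if cur ∈ st.1 then st.1 else st.1 ++ [cur]), cur)) (S, node)).2 = node ++ parts ∧
    (∀ q, q ∈ (parts.foldl (fun st part =>
        let cur := st.2 ++ [part]
        ((if cur ∈ st.1 then st.1 else st.1 ++ [cur]), cur)) (S, node)).1 ↔
      q ∈ S ∨ ∃ k : Nat, 1 ≤ k ∧ k ≤ parts.length ∧ q = node ++ parts.take k) ∧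
    (S.Nodup → (parts.foldl (fun st part =>
        let cur := st.2 ++ [part]
        ((if cur ∈ st.1 then st.1 else st.1 ++ [cur]), cur)) (S, node)).1.Nodup) := by
  induction parts with
  | nil => intro S node; refine ⟨by simp, fun q => by simp, fun h => by simpa⟩
  | cons part rest ih =>
    intro S node
    simp only [List.foldl_cons]
    set S' := if node ++ [part] ∈ S then S else S ++ [node ++ [part]] with hS'
    obtain ⟨h2, hmem, hnd⟩ := ih S' (node ++ [part])
    have hS'mem : ∀ q, q ∈ S' ↔ q ∈ S ∨ q = node ++ [part] := by
      intro q
      by_cases h : node ++ [part] ∈ S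
      · simp only [hS', if_pos h]
        exact ⟨Or.inl, fun hq => hq.elim id (fun e => e ▸ h)⟩
      · simp [hS', if_neg h]
    refine ⟨by simpa using h2, ?_, ?_⟩
    · intro q
      rw [hmem, hS'mem]
      constructor
      · rintro ((h | rfl) | ⟨k, h1, h2, rfl⟩)
        · exact Or.inl h
        · exact Or.inr ⟨1, le_refl 1, by simp, by simp⟩
        · exact Or.inr ⟨k + 1, by omega, by simpa using h2, by simp⟩
      · rintro (h | ⟨k, h1, h2, rfl⟩)
        · exact Or.inl (Or.inl h)
        · match k, h1 with
          | 1, _ => exact Or.inl (Or.inr (by simp))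
          | (j+2), _ =>
            refine Or.inr ⟨j + 1, by omega, by simp at h2 ⊢; omega, by simp⟩
    · intro h
      refine hnd ?_
      by_cases hmem2 : node ++ [part] ∈ S
      · simpa [hS', if_pos hmem2] using h
      · rw [hS', if_neg hmem2]
        simpa [List.nodup_append] using ⟨h, fun a ha hae => hmem2 (hae ▸ ha)⟩

lemma pv_mem_pftAdd (S : List (List String)) (parts q : List String) :
    q ∈ pftAdd S parts ↔ q ∈ S ∨ ∃ k : Nat, 1 ≤ k ∧ k ≤ parts.length ∧ q = parts.take k := by
  have := (pv_add_aux parts S []).2.1 q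
  unfold pftAdd
  simpa using this

lemma pv_nodup_pftAdd (S : List (List String)) (parts : List String) (h : S.Nodup) :
    (pftAdd S parts).Nodup := (pv_add_aux parts S []).2.2 h

lemma pv_build_aux (l : List String) : ∀ (acc : List (List String)),
    (∀ q, q ∈ l.foldl (fun S path => pftAdd S (pftParts path)) acc ↔ q ∈ acc ∨ pvMem l q) ∧
    (acc.Nodup → (l.foldl (fun S path => pftAdd S (pftParts path)) acc).Nodup) := by
  induction l with
  | nil => intro acc; exact ⟨fun q => by simp [pvMem], fun h => by simpa⟩
  | cons s t ih =>
    intro acc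
    obtain ⟨ihm, ihn⟩ := ih (pftAdd acc (pftParts s))
    constructor
    · intro q
      rw [List.foldl_cons, ihm, pv_mem_pftAdd]
      unfold pvMem
      simp only [List.mem_cons]
      constructor
      · rintro ((h | ⟨k, h1, h2, h3⟩) | ⟨s', hs', h⟩)
        · exact Or.inl h
        · exact Or.inr ⟨s, Or.inl rfl, k, h1, h2, h3⟩
        · exact Or.inr ⟨s', Or.inr hs', h⟩
      · rintro (h | ⟨s', (rfl | hs'), h⟩)
        · exact Or.inl (Or.inl h)
        · exact Or.inl (Or.inr h)
        · exact Or.inr ⟨s', hs', h⟩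
    · intro h
      exact ihn (pv_nodup_pftAdd _ _ h)

lemma pv_mem_build (fl : List String) (q : List String) :
    q ∈ pftBuild fl ↔ pvMem fl q := by
  unfold pftBuild
  rw [((pv_build_aux _ _).1 q)]
  simp only [List.not_mem_nil, false_or]
  unfold pvMem
  constructor
  · rintro ⟨s, hs, h⟩
    exact ⟨s, (PySem.List.mem_sorted _ _ _ _).1 hs, h⟩
  · rintro ⟨s, hs, h⟩
    exact ⟨s, (PySem.List.mem_sorted _ _ _ _).2 hs, h⟩

lemma pv_nodup_build (fl : List String) : (pftBuild fl).Nodup :=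
  (pv_build_aux _ _).2 List.nodup_nil

lemma pv_pvMem_good {L : List (List String)} (fl : List String)
    (hmem : ∀ q, q ∈ L ↔ pvMem fl q) (hnd : L.Nodup) : pvGood L := by
  refine ⟨hnd, ?_, ?_⟩
  · intro q hq
    obtain ⟨s, hs, k, h1, h2, rfl⟩ := (hmem q).1 hq
    have := pv_parts_ne_nil s
    intro h
    rw [List.take_eq_nil_iff] at h
    rcases h with h | h
    · omega
    · exact this h
  · intro q hq k hk1 hk2
    obtain ⟨s, hs, k0, h1, h2, rfl⟩ := (hmem q).1 hq
    rw [List.length_take] at hk2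
    rw [List.take_take]
    refine (hmem _).2 ⟨s, hs, min k k0, ?_, ?_, rfl⟩
    · omega
    · omega

lemma pv_good_build (fl : List String) : pvGood (pftBuild fl) :=
  pv_pvMem_good fl (pv_mem_build fl) (pv_nodup_build fl)

lemma pv_concat_self (q : List String) (h : q ≠ []) : q.dropLast ++ [q.getLastD ""] = q := by
  induction q using List.reverseRecOn with
  | nil => simp at h
  | append_singleton l a ih => simp

lemma pv_mem_children {S : List (List String)} (hG : pvGood S) (p : List String) (c : String) :
    c ∈ pftChildren S p ↔ p ++ [c] ∈ S := by
  unfold pftChildren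
  constructor
  · intro h
    rcases List.mem_map.1 h with ⟨q, hq, rfl⟩
    rcases List.mem_filter.1 hq with ⟨hqS, hdrop⟩
    have hd : q.dropLast = p := by simpa using hdrop
    have hne := hG.2.1 q hqS
    rw [← hd, pv_concat_self q hne]
    exact hqS
  · intro h
    refine List.mem_map.2 ⟨p ++ [c], List.mem_filter.2 ⟨h, by simp⟩, by simp⟩

lemma pv_nodup_children {S : List (List String)} (hG : pvGood S) (p : List String) :
    (pftChildren S p).Nodup := by
  unfold pftChildren
  refine (List.nodup_map_iff_inj_on (hG.1.filter _)).2 ?_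
  intro q1 h1 q2 h2 he
  rcases List.mem_filter.1 h1 with ⟨hq1, hd1⟩
  rcases List.mem_filter.1 h2 with ⟨hq2, hd2⟩
  have hd1' : q1.dropLast = p := by simpa using hd1
  have hd2' : q2.dropLast = p := by simpa using hd2
  rw [← pv_concat_self q1 (hG.2.1 q1 hq1), ← pv_concat_self q2 (hG.2.1 q2 hq2), hd1', hd2', he]

lemma pv_children_ne_nil_iff {S : List (List String)} (hG : pvGood S) (p : List String) :
    pftChildren S p ≠ [] ↔ pvDesc S p ≠ [] := by
  rw [← List.isEmpty_eq_false_iff, ← List.isEmpty_eq_false_iff]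
  simp only [List.isEmpty_eq_false_iff_exists_mem]
  constructor
  · rintro ⟨c, hc⟩
    have := (pv_mem_children hG p c).1 hc
    exact ⟨p ++ [c], (pv_mem_desc _ _ _).2 ⟨this, ⟨[c], rfl⟩, by simp⟩⟩
  · rintro ⟨q, hq⟩
    rcases (pv_mem_desc _ _ _).1 hq with ⟨hqS, ⟨t, rfl⟩, hne⟩
    have ht : t ≠ [] := by rintro rfl; simp at hne
    refine ⟨t.headI, (pv_mem_children hG p t.headI).2 ?_⟩
    have h1 : (p ++ t).take (p.length + 1) = p ++ [t.headI] := by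
      rw [List.take_append]
      congr 1
      · exact List.take_of_length_le (by omega)
      · match t, ht with
        | a :: t', _ => simp
    have := hG.2.2 (p ++ t) hqS (p.length + 1) (by omega)
      (by simp; cases t <;> simp_all)
    rwa [h1] at this

lemma pv_max?_perm {xs ys : List String} (h : xs.Perm ys) :
    PySem.List.max? xs (fun x => x) = PySem.List.max? ys (fun x => x) := by
  match hx : PySem.List.max? xs (fun x => x), hy : PySem.List.max? ys (fun x => x) with
  | none, none => rfl
  | none, some my =>
    rw [PySem.List.max?_eq_none_iff] at hx
    subst hx
    have := PySem.List.max?_mem hy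
    simp [← h.mem_iff] at this
  | some mx, none =>
    rw [PySem.List.max?_eq_none_iff] at hy
    subst hy
    have := PySem.List.max?_mem hx
    simp [h.mem_iff] at this
  | some mx, some my =>
    have h1 : mx ≤ my := PySem.List.max?_isMax hy mx (h.mem_iff.1 (PySem.List.max?_mem hx))
    have h2 : my ≤ mx := PySem.List.max?_isMax hx my (h.mem_iff.2 (PySem.List.max?_mem hy))
    rw [le_antisymm h1 h2]

lemma pv_omax_foldl (xs : List String) : ∀ (a : String),
    xs.foldl (fun o v => some (match o with | none => v | some m => max m v)) (some a)
      = some (xs.foldl max a) := by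
  induction xs with
  | nil => intro a; rfl
  | cons x t ih => intro a; rw [List.foldl_cons, List.foldl_cons, ih]

lemma pv_maxChild_aux (L : List (List String)) :
    ∀ (d : PySem.Dict (List String) String) (p : List String),
      (L.foldl (fun d r =>
          if !(d.contains r.dropLast) || (d.getD r.dropLast "" < r.getLastD "") then
            d.insert r.dropLast (r.getLastD "")
          else d) d).get? p
        = ((L.filter (fun r => r.dropLast == p)).map (fun r => r.getLastD "")).foldl
            (fun o v => some (match o with | none => v | some m => max m v)) (d.get? p) := by
  induction L with
  | nil => intro d p; rfl
  | cons r t ih =>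
    intro d p
    rw [List.foldl_cons, ih]
    by_cases hp : r.dropLast = p
    · rw [List.filter_cons_of_pos (by simpa using hp), List.map_cons, List.foldl_cons]
      congr 1
      subst hp
      by_cases hc : d.contains r.dropLast = true
      · rw [PySem.Dict.contains_eq_isSome_get?] at hc
        obtain ⟨m, hm⟩ := Option.isSome_iff_exists.1 hc
        have hm' : d.getD r.dropLast "" = m := by unfold PySem.Dict.getD; rw [hm]; rfl
        by_cases hlt : d.getD r.dropLast "" < r.getLastD ""
        · rw [if_pos (by
            rw [PySem.Dict.contains_eq_isSome_get?, hc]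
            simpa using hlt)]
          rw [PySem.Dict.get?_insert_self, hm]
          rw [hm'] at hlt
          show some (r.getLastD "") = some (max m (r.getLastD ""))
          rw [max_eq_right (le_of_lt hlt)]
        · rw [if_neg (by
            rw [PySem.Dict.contains_eq_isSome_get?, hc]
            simpa using hlt)]
          rw [hm]
          rw [hm'] at hlt
          show some m = some (max m (r.getLastD ""))
          rw [max_eq_left (le_of_not_gt hlt)]
      · rw [if_pos (by rw [Bool.not_eq_true] at hc; simp [hc])]
        rw [PySem.Dict.get?_insert_self]
        have h0 : d.get? r.dropLast = none := by
          rw [PySem.Dict.contains_eq_isSome_get?] at hc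
          simpa using hc
        rw [h0]
    · rw [List.filter_cons_of_neg (by simpa using hp)]
      congr 1
      split
      · exact PySem.Dict.get?_insert_of_ne _ _ (fun h => hp h.symm)
      · rfl

lemma pv_maxChild_getD (L : List (List String)) (p : List String) :
    (pftMaxChild L).getD p ""
      = ((PySem.List.max? ((L.filter (fun r => r.dropLast == p)).map (fun r => r.getLastD ""))
          (fun x => x)).getD "") := by
  have h0 : (pftMaxChild L).getD p "" = ((pftMaxChild L).get? p).getD "" := rfl
  rw [h0]
  unfold pftMaxChild
  rw [pv_maxChild_aux, PySem.Dict.get?_empty]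
  cases hxs : (L.filter (fun r => r.dropLast == p)).map (fun r => r.getLastD "") with
  | nil => rfl
  | cons x xs =>
    rw [List.foldl_cons, pv_omax_foldl, PySem.List.max?_id_cons]

lemma pv_isLast_perm {S P : List (List String)} (h : S.Perm P) (q : List String) :
    pftIsLast S q = pftIsLast P q := by
  unfold pftIsLast
  rw [pv_maxChild_getD, pv_maxChild_getD, pv_max?_perm ((h.filter _).map _)]

lemma pv_isLast_spec {S : List (List String)} (hG : pvGood S) {p : List String} {c : String}
    (hc : c ∈ pftChildren S p) :
    pftIsLast S (p ++ [c]) = true ↔ ∀ y ∈ pftChildren S p, y ≤ c := by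
  unfold pftIsLast
  rw [pv_maxChild_getD]
  simp only [List.dropLast_concat]
  have hne : pftChildren S p ≠ [] := by rintro h; rw [h] at hc; simp at hc
  rw [show (S.filter (fun r => r.dropLast == p)).map (fun r => r.getLastD "")
      = pftChildren S p from rfl]
  match hm : PySem.List.max? (pftChildren S p) (fun x => x) with
  | none => rw [PySem.List.max?_eq_none_iff] at hm; exact absurd hm hne
  | some m =>
    have hmem := PySem.List.max?_mem hm
    have hmax := PySem.List.max?_isMax hm
    simp only [Option.getD_some, List.getLastD_concat, beq_iff_eq]
    constructor
    · rintro rfl; exact hmax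
    · intro h; exact le_antisymm (hmax c hc) (h m hmem)

lemma pv_lex_prefix_lt (p t : List String) (h : t ≠ []) : p < p ++ t := by
  show List.Lex (· < ·) p (p ++ t)
  have : List.Lex (· < ·) ([] : List String) t := by
    match t, h with
    | a :: t', _ => exact List.Lex.nil
  simpa using List.Lex.append_left (· < ·) this p

lemma pv_lex_mid_lt (p r1 r2 : List String) {c1 c2 : String} (h : c1 < c2) :
    p ++ c1 :: r1 < p ++ c2 :: r2 := by
  show List.Lex (· < ·) _ _
  exact List.Lex.append_left (· < ·) (List.Lex.rel h) p

lemma pv_dec_eq : (fun (a b : List String) => a.decidableLT b) = (LinearOrder.toDecidableLT : DecidableLT (List String)) := by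
  funext a b
  exact Subsingleton.elim _ _

lemma pv_sorted_inst (xs : List (List String)) (key : List String → List String) (rev : Bool) :
    (@PySem.List.sorted (List String) (List String) List.instLT (fun a b => a.decidableLT b) xs key rev)
      = (@PySem.List.sorted (List String) (List String) List.instLinearOrder.toLT LinearOrder.toDecidableLT xs key rev) := by
  rw [← pv_dec_eq]

lemma pv_sorted_strict {xs : List String} (h : xs.Nodup) :
    (PySem.List.sorted xs (fun x => x) false).Pairwise (· < ·) := by
  have h1 := PySem.List.sorted_pairwise xs (fun x => x)
  have h2 : (PySem.List.sorted xs (fun x => x) false).Nodup :=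
    ((PySem.List.sorted_perm xs (fun x => x) false).nodup_iff).2 h
  exact (h1.and h2).imp (fun {a b} hab => lt_of_le_of_ne hab.1 hab.2)

lemma pv_sorted_strict' {xs : List (List String)} (h : xs.Nodup) :
    (PySem.List.sorted xs (fun x => x) false).Pairwise (· < ·) := by
  have h2 : (PySem.List.sorted xs (fun x => x) false).Nodup :=
    ((PySem.List.sorted_perm xs (fun x => x) false).nodup_iff).2 h
  rw [pv_sorted_inst] at h2 ⊢
  have h1 := PySem.List.sorted_pairwise xs (fun x => x)
  exact (h1.and h2).imp (fun {a b} hab => lt_of_le_of_ne hab.1 hab.2)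

lemma pv_nodup_desc {S : List (List String)} (hG : pvGood S) (p : List String) :
    (pvDesc S p).Nodup := hG.1.filter _

lemma pv_headI_child {S : List (List String)} (hG : pvGood S) {p t : List String}
    (hqS : p ++ t ∈ S) (ht : t ≠ []) : t.headI ∈ pftChildren S p := by
  refine (pv_mem_children hG p t.headI).2 ?_
  have h1 : (p ++ t).take (p.length + 1) = p ++ [t.headI] := by
    rw [List.take_append]
    congr 1
    · exact List.take_of_length_le (by omega)
    · match t, ht with
      | a :: t', _ => simp
  have := hG.2.2 (p ++ t) hqS (p.length + 1) (by omega)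
    (by simp; cases t <;> simp_all)
  rwa [h1] at this

lemma pv_sorted_eq (xs ys : List (List String)) (h1 : ys.Perm xs) (h2 : ys.Pairwise (· < ·)) :
    PySem.List.sorted xs (fun x => x) false = ys := by
  rw [pv_sorted_inst]
  exact PySem.List.sorted_eq_of_perm_of_pairwise_lt xs ys (fun x => x) h1 h2

lemma pv_sorted_desc_decomp {S : List (List String)} (hG : pvGood S) (p : List String) :
    PySem.List.sorted (pvDesc S p) (fun x => x) false =
      ((PySem.List.sorted (pftChildren S p) (fun x => x) false).map
        (fun c => (p ++ [c]) :: PySem.List.sorted (pvDesc S (p ++ [c])) (fun x => x) false)).flatten := by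
  have hchild := pv_sorted_strict (pv_nodup_children hG p)
  -- each element of a block has the form p ++ c :: r
  have hform : ∀ c, ∀ x ∈ (p ++ [c]) :: PySem.List.sorted (pvDesc S (p ++ [c])) (fun x => x) false,
      ∃ r, x = p ++ c :: r := by
    intro c x hx
    rcases hx with _ | hx
    · exact ⟨[], rfl⟩
    · rename_i hx
      have := (PySem.List.mem_sorted _ _ _ _).1 hx
      rcases (pv_mem_desc _ _ _).1 this with ⟨hxS, ⟨t, rfl⟩, hne⟩
      exact ⟨t, by simp⟩
  -- pairwise < of the flattened list
  have hpw : (((PySem.List.sorted (pftChildren S p) (fun x => x) false).map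
        (fun c => (p ++ [c]) :: PySem.List.sorted (pvDesc S (p ++ [c])) (fun x => x) false)).flatten).Pairwise (· < ·) := by
    rw [List.pairwise_flatten]
    constructor
    · intro l hl
      rcases List.mem_map.1 hl with ⟨c, hc, rfl⟩
      refine List.pairwise_cons.2 ⟨?_, pv_sorted_strict' (pv_nodup_desc hG _)⟩
      intro q hq
      have := (PySem.List.mem_sorted _ _ _ _).1 hq
      rcases (pv_mem_desc _ _ _).1 this with ⟨hqS, ⟨t, rfl⟩, hne⟩
      have ht : t ≠ [] := by rintro rfl; simp at hne
      exact pv_lex_prefix_lt _ _ ht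
    · rw [List.pairwise_map]
      refine hchild.imp_of_mem ?_
      intro c1 c2 hc1 hc2 hlt x hx y hy
      rcases hform c1 x hx with ⟨r1, rfl⟩
      rcases hform c2 y hy with ⟨r2, rfl⟩
      exact pv_lex_mid_lt p r1 r2 hlt
  have hperm : (((PySem.List.sorted (pftChildren S p) (fun x => x) false).map
        (fun c => (p ++ [c]) :: PySem.List.sorted (pvDesc S (p ++ [c])) (fun x => x) false)).flatten).Perm (pvDesc S p) := by
    refine (List.perm_ext_iff_of_nodup (hpw.imp (fun {a b} h => ne_of_lt h)) (pv_nodup_desc hG p)).2 ?_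
    intro q
    simp only [List.mem_flatten, List.mem_map]
    constructor
    · rintro ⟨l, ⟨c, hc, rfl⟩, hq⟩
      have hcS : p ++ [c] ∈ S :=
        (pv_mem_children hG p c).1 ((PySem.List.mem_sorted _ _ _ _).1 hc)
      rcases hq with _ | hq
      · exact (pv_mem_desc _ _ _).2 ⟨hcS, ⟨[c], rfl⟩, by simp⟩
      · rename_i hq
        have := (PySem.List.mem_sorted _ _ _ _).1 hq
        rcases (pv_mem_desc _ _ _).1 this with ⟨hqS, ⟨t, rfl⟩, hne⟩
        refine (pv_mem_desc _ _ _).2 ⟨hqS, ⟨c :: t, by simp⟩, ?_⟩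
        intro h
        have := congrArg List.length h
        simp at this
    · intro hq
      rcases (pv_mem_desc _ _ _).1 hq with ⟨hqS, ⟨t, rfl⟩, hne⟩
      have ht : t ≠ [] := by rintro rfl; simp at hne
      have hc := pv_headI_child hG hqS ht
      refine ⟨_, ⟨t.headI, (PySem.List.mem_sorted _ _ _ _).2 hc, rfl⟩, ?_⟩
      match t, ht with
      | [a], _ => exact List.mem_cons_self ..
      | a :: b :: t', _ =>
        refine List.mem_cons_of_mem _ ((PySem.List.mem_sorted _ _ _ _).2 ?_)
        refine (pv_mem_desc _ _ _).2 ⟨by simpa using hqS, ⟨b :: t', by simp⟩, ?_⟩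
        intro h
        have := congrArg List.length h
        simp at this

  exact pv_sorted_eq _ _ hperm hpw

lemma pv_build_perm_prefixes (fl : List String) : (pftBuild fl).Perm (pftPrefixes fl) := by
  refine (List.perm_ext_iff_of_nodup (pv_nodup_build fl) (pv_nodup_prefixes fl)).2 ?_
  intro q
  rw [pv_mem_build, pv_mem_prefixes]

-- line algebra ----------------------------------------------------------------

lemma pv_join_empty_nil : PySem.Str.join "" [] = "" := rfl

lemma pv_join_empty_cons (x : String) (xs : List String) :
    PySem.Str.join "" (x :: xs) = x ++ PySem.Str.join "" xs := by
  match xs with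
  | [] =>
    show PySem.Str.join "" [x] = x ++ PySem.Str.join "" []
    rw [pv_join_empty_nil, String.append_empty]
    unfold PySem.Str.join
    simp [PySem.Chars.join, List.intercalate]
  | y :: ys =>
    unfold PySem.Str.join
    simp only [List.map_cons]
    rw [PySem.Chars.join_cons_cons]
    simp only [String.toList_empty, List.append_nil]
    rw [String.ofList_append]
    simp

lemma pv_lineRel_self (L : List (List String)) (p : List String) (c : String) (pre : String) :
    pvLineRel L p.length pre (p ++ [c]) =
      pre ++ ((if pftIsLast L (p ++ [c]) then "`-- " else "|-- ") ++ c) := by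
  unfold pvLineRel
  rw [PySem.List.pyRange_one_eq_nil (by simp)]
  simp [pv_join_empty_nil, String.append_empty]

lemma pv_lineRel_step (L : List (List String)) (p : List String) (c : String) (pre : String)
    {q : List String} (hq : (p ++ [c]) <+: q) (hne : q ≠ p ++ [c]) :
    pvLineRel L p.length pre q =
      pvLineRel L (p.length + 1) (pre ++ pvMarker L (p ++ [c])) q := by
  obtain ⟨t, rfl⟩ := hq
  have ht : t ≠ [] := by rintro rfl; simp at hne
  have hlen : (p ++ [c] ++ t).length = p.length + 1 + t.length := by simp; omega
  have ht1 : 0 < t.length := List.length_pos_of_ne_nil ht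
  unfold pvLineRel
  rw [PySem.List.pyRange_one_cons (by
    simp only [List.length_append, List.length_cons, List.length_nil]
    push_cast
    omega)]
  rw [List.map_cons, pv_join_empty_cons]
  have hsl : PySem.List.slice (p ++ [c] ++ t) none (some ((p.length : Int) + 1)) = p ++ [c] := by
    have : ((p.length : Int) + 1) = ((p.length + 1 : Nat) : Int) := by push_cast; ring
    rw [this, PySem.List.slice_to _ (by positivity)]
    simp only [Int.toNat_natCast]
    exact List.take_left' (by simp)
  rw [hsl]
  have hc : ((p.length : Int) + 1 + 1) = (((p.length + 1 : Nat) : Int) + 1) := by push_cast; ring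
  rw [hc]
  simp only [String.append_assoc]

-- main induction --------------------------------------------------------------

lemma pv_renderItems_eq {S : List (List String)} (hG : pvGood S) (p : List String) (pre : String)
    (IH : ∀ c, c ∈ pftChildren S p → pftChildren S (p ++ [c]) ≠ [] →
      ∀ pre', pftRenderA S (p ++ [c]) pre' =
        (PySem.List.sorted (pvDesc S (p ++ [c])) (fun x => x) false).map
          (pvLineRel S (p ++ [c]).length pre')) :
    ∀ (rest done : List String),
      PySem.List.sorted (pftChildren S p) (fun x => x) false = done ++ rest →
      pftRenderItems S p pre rest
          (PySem.List.sorted (pftChildren S p) (fun x => x) false).length done.length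
        = (rest.map (fun c =>
            pvLineRel S p.length pre (p ++ [c]) ::
              (PySem.List.sorted (pvDesc S (p ++ [c])) (fun x => x) false).map
                (pvLineRel S p.length pre))).flatten := by
  intro rest
  induction rest with
  | nil => intro done hdec; rw [pftRenderItems]; simp
  | cons name rest' ihr =>
    intro done hdec
    have hlen : (PySem.List.sorted (pftChildren S p) (fun x => x) false).length
        = done.length + 1 + rest'.length := by rw [hdec]; simp; omega
    have hmemname : name ∈ pftChildren S p := by
      have : name ∈ PySem.List.sorted (pftChildren S p) (fun x => x) false := by
        rw [hdec]; simp
      exact (PySem.List.mem_sorted _ _ _ _).1 this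
    have hpw : (done ++ name :: rest').Pairwise (· < ·) := by
      rw [← hdec]; exact pv_sorted_strict (pv_nodup_children hG p)
    -- the i == n-1 flag equals pftIsLast S (p ++ [name])
    have hflag : (done.length ==
        (PySem.List.sorted (pftChildren S p) (fun x => x) false).length - 1)
        = pftIsLast S (p ++ [name]) := by
      rcases rest' with _ | ⟨r, rest''⟩
      · have : ∀ y ∈ pftChildren S p, y ≤ name := by
          intro y hy
          have : y ∈ done ++ [name] := by
            rw [← hdec]; exact (PySem.List.mem_sorted _ _ _ _).2 hy
          rcases List.mem_append.1 this with hy' | hy'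
          · rcases List.pairwise_append.1 hpw with ⟨_, _, hrel⟩
            exact le_of_lt (hrel y hy' name (List.mem_cons_self ..))
          · rw [List.mem_singleton.1 hy']
        rw [(pv_isLast_spec hG hmemname).2 this, hlen]
        simp
      · have hlt : name < r := (List.pairwise_cons.1 (List.pairwise_append.1 hpw).2.1).1 r (List.mem_cons_self ..)
        have hrmem : r ∈ pftChildren S p := by
          have : r ∈ done ++ name :: r :: rest'' := by simp
          rw [← hdec] at this
          exact (PySem.List.mem_sorted _ _ _ _).1 this
        have hnotlast : pftIsLast S (p ++ [name]) = false := by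
          rw [← Bool.not_eq_true]
          intro hc
          exact absurd ((pv_isLast_spec hG hmemname).1 hc r hrmem) (not_le.2 hlt)
        rw [hnotlast, hlen]
        simp
        omega
    rw [pftRenderItems]
    rw [List.map_cons, List.flatten_cons, List.cons_append]
    rw [hflag]
    rw [pv_lineRel_self]
    congr 1
    · rw [String.append_assoc]
    have hsubs : ∀ q ∈ PySem.List.sorted (pvDesc S (p ++ [name])) (fun x => x) false,
        (p ++ [name]) <+: q ∧ q ≠ p ++ [name] := by
      intro q hq
      have := (pv_mem_desc _ _ _).1 ((PySem.List.mem_sorted _ _ _ _).1 hq)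
      exact ⟨this.2.1, this.2.2⟩
    congr 1
    · by_cases hch : pftChildren S (p ++ [name]) ≠ []
      · rw [dif_pos hch]
        rw [IH name hmemname hch]
        simp only [List.length_append, List.length_cons, List.length_nil]
        refine List.map_congr_left ?_
        intro q hq
        have hstep := pv_lineRel_step S p name pre (hsubs q hq).1 (hsubs q hq).2
        rw [show pvMarker S (p ++ [name])
            = (if pftIsLast S (p ++ [name]) then "    " else "|   ") from rfl] at hstep
        exact hstep.symm
      · rw [dif_neg hch]
        rw [not_ne_iff] at hch
        have hdesc : pvDesc S (p ++ [name]) = [] := by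
          by_contra hd
          exact ((pv_children_ne_nil_iff hG (p ++ [name])).2 hd) hch
        rw [hdesc]
        simp [PySem.List.sorted]
    · simpa using ihr (done ++ [name]) (by rw [hdec]; simp)

-- top level -------------------------------------------------------------------

lemma pv_renderA_eq_aux {S : List (List String)} (hG : pvGood S) :
    ∀ (d : Nat) (p : List String) (pre : String), pftMaxLen S + 1 - p.length ≤ d →
      pftRenderA S p pre =
        (PySem.List.sorted (pvDesc S p) (fun x => x) false).map (pvLineRel S p.length pre) := by
  intro d
  induction d with
  | zero =>
    intro p pre hd
    have hch : ¬ pftChildren S p ≠ [] := by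
      intro h
      have := pftChildren_ne_nil_bound h
      omega
    rw [not_ne_iff] at hch
    have hdesc : pvDesc S p = [] := by
      by_contra hx
      exact ((pv_children_ne_nil_iff hG p).2 hx) hch
    rw [pftRenderA, hch, hdesc]
    rw [pftRenderItems.eq_def]
    simp [PySem.List.sorted]
  | succ d ih =>
    intro p pre hd
    rw [pftRenderA]
    have := pv_renderItems_eq hG p pre
      (fun c hc hch pre' => by
        have hb := pftChildren_ne_nil_bound hch
        simp only [List.length_append, List.length_cons, List.length_nil] at hb
        exact ih (p ++ [c]) pre' (by simp; omega))
      (PySem.List.sorted (pftChildren S p) (fun x => x) false) [] rfl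
    simp only [List.length_nil] at this
    rw [this]
    rw [pv_sorted_desc_decomp hG p, List.map_flatten]
    congr 1
    rw [List.map_map]
    refine List.map_congr_left ?_
    intro c hc
    simp

lemma pv_renderA_eq {S : List (List String)} (hG : pvGood S) (p : List String) (pre : String) :
    pftRenderA S p pre =
      (PySem.List.sorted (pvDesc S p) (fun x => x) false).map (pvLineRel S p.length pre) :=
  pv_renderA_eq_aux hG (pftMaxLen S + 1 - p.length) p pre (le_refl _)

lemma pv_desc_nil {S : List (List String)} (hG : pvGood S) : pvDesc S [] = S := by
  unfold pvDesc
  refine List.filter_eq_self.2 ?_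
  intro q hq
  simp [List.nil_prefix, hG.2.1 q hq]

lemma pv_sorted_congr {xs ys : List (List String)} (h : xs.Perm ys) :
    PySem.List.sorted xs (fun x => x) false = PySem.List.sorted ys (fun x => x) false := by
  rw [pv_sorted_inst, pv_sorted_inst]
  exact PySem.List.sorted_eq_sorted_of_perm xs ys (fun x => x) (fun a b hab => hab) h

lemma pv_main (file_list : List String) (max_chars : Int) :
    prepare_file_tree file_list max_chars = prepare_file_tree_alt file_list max_chars := by
  unfold prepare_file_tree prepare_file_tree_alt
  by_cases hfl : file_list = []
  · rw [if_pos hfl, if_pos hfl]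
  · rw [if_neg hfl, if_neg hfl]
    dsimp only
    have hG := pv_good_build file_list
    have hperm := pv_build_perm_prefixes file_list
    have hlines : pftRenderA (pftBuild file_list) [] "" =
        (PySem.List.sorted (pftPrefixes file_list) (fun x => x) false).foldl (fun acc p =>
          acc ++ [PySem.Str.join ""
              ((PySem.List.pyRange 1 ((p.length : Int)) 1).map (fun j =>
                if pftIsLast (pftPrefixes file_list) (PySem.List.slice p none (some j)) then "    "
                else "|   ")) ++
            (if pftIsLast (pftPrefixes file_list) p then "`-- " else "|-- ") ++ p.getLastD ""]) [] := by
      rw [PySem.List.foldl_append_singleton_eq_map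
        (fun p => PySem.Str.join ""
              ((PySem.List.pyRange 1 ((p.length : Int)) 1).map (fun j =>
                if pftIsLast (pftPrefixes file_list) (PySem.List.slice p none (some j)) then "    "
                else "|   ")) ++
            (if pftIsLast (pftPrefixes file_list) p then "`-- " else "|-- ") ++ p.getLastD "")]
      rw [List.nil_append]
      rw [pv_renderA_eq hG [] "", pv_desc_nil hG]
      rw [← pv_sorted_congr hperm]
      refine List.map_congr_left ?_
      intro q hq
      unfold pvLineRel pvMarker
      simp only [pv_isLast_perm hperm]
      simp only [List.length_nil, Nat.cast_zero, zero_add, String.empty_append,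
        String.append_assoc]
    rw [hlines]

-- ===== VERDICT (by name: the statement is the Claim_ definition above) =====
theorem prepare_file_tree_spec : Claim_equal_prepare_file_tree := by
  intro file_list max_chars _
  unfold Spec_prepare_file_tree
  exact pv_main file_list max_chars
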